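-- pv_equiv track=rewrite | github.com/espeon011/opt_note | src/opt_note/scsp/model/dr/__init__.py | longest_suffix_index
-- ===== SOURCE A (Python) =====
-- def longest_suffix_index(s1: str, s2: str) -> int:
--     """
--     `s1[idx:]` が `s2` の部分配列となるもののうち最小の idx を返す.
--     (つまり `s1[idx:]` が最長となるようにする. )
--     """
--
--     next = len(s1) - 1
--     for c in reversed(s2):
--         if next == -1:
--             break
--         if s1[next] == c:
--             next -= 1
--
--     return next + 1
-- ===== SOURCE B (Python) =====
-- def longest_suffix_index(s1: str, s2: str) -> int:
--     def is_subsequence(sub: str, s: str) -> bool: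
--         i = 0
--         for c in s:
--             if i < len(sub) and sub[i] == c:
--                 i += 1
--         return i == len(sub)
--
--     # "s1[idx:] is a subsequence of s2" is monotone in idx, so binary-search
--     # for the least such idx (idx == len(s1) always qualifies).
--     lo, hi = 0, len(s1)
--     while lo < hi:
--         mid = (lo + hi) // 2
--         if is_subsequence(s1[mid:], s2):
--             hi = mid
--         else:
--             lo = mid + 1
--     return lo
-- ===== Notes on version B (the rewrite author's own statement) =====
-- stated objective: alternative
-- what changed: Replaces A's single backward greedy scan over s2 with a binary search over idx on the monotone predicate 's1[idx:] is a subsequence of s2', checked by a forward two-pointer subsequence test.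
import Mathlib
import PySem

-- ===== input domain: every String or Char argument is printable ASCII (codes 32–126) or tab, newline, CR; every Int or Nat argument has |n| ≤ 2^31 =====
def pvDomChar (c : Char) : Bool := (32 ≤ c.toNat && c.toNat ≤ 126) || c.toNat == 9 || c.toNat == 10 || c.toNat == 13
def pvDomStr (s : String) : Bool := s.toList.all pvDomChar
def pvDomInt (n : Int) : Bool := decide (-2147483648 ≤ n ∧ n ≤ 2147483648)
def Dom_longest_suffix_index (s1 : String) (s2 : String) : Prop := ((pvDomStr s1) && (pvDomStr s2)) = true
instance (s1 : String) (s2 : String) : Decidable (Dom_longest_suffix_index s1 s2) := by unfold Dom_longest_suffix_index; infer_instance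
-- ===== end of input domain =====

-- B replaces A's single backward greedy scan with a binary search for the least idx whose
-- suffix s1[idx:] is a subsequence of s2 (alternative algorithm, similar cost).

-- ===== PORT A =====
-- Literal port of A: walk s2 backwards, moving `next` down whenever s1[next] matches.
-- The s1[next] index is always in range when read (guarded by the `next == -1` break),
-- so the `.getD 'a'` default is unreachable.
def pvAAux (l1 : List Char) : List Char → Int → Int
  | [], next => next
  | c :: rest, next =>
    if next = -1 then next
    else if (PySem.List.pyGet? l1 next).getD 'a' = c then pvAAux l1 rest (next - 1)
    else pvAAux l1 rest next

def longest_suffix_index (s1 : String) (s2 : String) : Int :=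
  pvAAux s1.toList s2.toList.reverse ((s1.toList.length : Int) - 1) + 1

-- ===== PORT B =====
-- is_subsequence: forward two-pointer walk, i is the pointer into sub.
def pvIsSubStep (sub : List Char) (i : Nat) (c : Char) : Nat :=
  if i < sub.length ∧ sub.getD i 'a' = c then i + 1 else i

def pvIsSub (sub s : List Char) : Bool :=
  (s.foldl (pvIsSubStep sub) 0) == sub.length

-- binary search: least idx with s1[idx:] a subsequence of s2 (s1[mid:] with mid ≥ 0 is List.drop).
def pvBSearch (l1 l2 : List Char) (lo hi : Nat) : Nat :=
  if _h : lo < hi then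
    if pvIsSub (l1.drop ((lo + hi) / 2)) l2 then pvBSearch l1 l2 lo ((lo + hi) / 2)
    else pvBSearch l1 l2 ((lo + hi) / 2 + 1) hi
  else lo
termination_by hi - lo
decreasing_by all_goals omega

def longest_suffix_index_alt (s1 : String) (s2 : String) : Int :=
  (pvBSearch s1.toList s2.toList 0 s1.toList.length : Int)

-- ===== PRECONDITION & SPEC =====
def Spec_longest_suffix_index (s1 : String) (s2 : String) (out : Int) : Prop := out = longest_suffix_index_alt s1 s2
instance (s1 : String) (s2 : String) (out : Int) : Decidable (Spec_longest_suffix_index s1 s2 out) := by unfold Spec_longest_suffix_index; infer_instance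

-- ===== CLAIM (what is proved, stated in full; the proofs are below) =====
def Claim_equal_longest_suffix_index : Prop := ∀ (s1 : String) (s2 : String), Dom_longest_suffix_index s1 s2 → Spec_longest_suffix_index s1 s2 (longest_suffix_index s1 s2)

-- ===== LEMMAS AND PROOFS =====

-- greedy forward match count of `sub` into `s` (the value B's two-pointer i reaches,
-- and, on reversed lists, the number of characters A's backward walk matches)
def pvMatch : List Char → List Char → Nat
  | _, [] => 0
  | [], _ :: _ => 0
  | a :: t, c :: s => if a = c then pvMatch t s + 1 else pvMatch (a :: t) s

lemma pvMatch_nil_left (s : List Char) : pvMatch [] s = 0 := by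
  cases s <;> rfl

lemma pvMatch_le (r2 r1 : List Char) : pvMatch r1 r2 ≤ r1.length := by
  induction r2 generalizing r1 with
  | nil => cases r1 <;> simp [pvMatch]
  | cons c s ih =>
    cases r1 with
    | nil => simp [pvMatch]
    | cons b t =>
      by_cases h : b = c
      · simpa [pvMatch, h] using ih t
      · simpa [pvMatch, h] using (ih (b :: t))

lemma take_pvMatch_sublist (r2 r1 : List Char) : (r1.take (pvMatch r1 r2)).Sublist r2 := by
  induction r2 generalizing r1 with
  | nil => cases r1 <;> simp [pvMatch]
  | cons c s ih =>
    cases r1 with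
    | nil => simp [pvMatch_nil_left]
    | cons b t =>
      by_cases h : b = c
      · subst h
        simpa [pvMatch] using (ih t).cons₂ b
      · simpa [pvMatch, h] using (ih (b :: t)).cons c

lemma length_le_pvMatch (r2 : List Char) : ∀ (l r1 : List Char), l.Sublist r2 → l <+: r1 →
    l.length ≤ pvMatch r1 r2 := by
  induction r2 with
  | nil =>
    intro l r1 hs _
    simp [List.sublist_nil.mp hs]
  | cons c s ih =>
    intro l r1 hs hp
    cases l with
    | nil => simp
    | cons x l' =>
      cases r1 with
      | nil => exact absurd hp (by simp)
      | cons b t =>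
        obtain ⟨hxb, hp'⟩ := List.cons_prefix_cons.mp hp
        subst hxb
        have hl' : l'.Sublist s := by
          cases hs with
          | cons _ h => exact (List.sublist_cons_self x l').trans h
          | cons₂ _ h => exact h
        by_cases h : x = c
        · subst h
          have := ih l' t hl' hp'
          simp [pvMatch]
          omega
        · have hxs : (x :: l').Sublist s := by
            cases hs with
            | cons _ hss => exact hss
            | cons₂ _ _ => exact absurd rfl h
          simpa [pvMatch, h] using ih (x :: l') (x :: t) hxs (by simp [hp'])

lemma foldl_pvIsSubStep (sub : List Char) :
    ∀ (s : List Char) (i : Nat), i ≤ sub.length →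
      s.foldl (pvIsSubStep sub) i = i + pvMatch (sub.drop i) s := by
  intro s
  induction s with
  | nil => intro i _; simp [pvMatch]
  | cons c s ih =>
    intro i hi
    rcases Nat.lt_or_ge i sub.length with hlt | hge
    · have hdrop : sub.drop i = sub[i] :: sub.drop (i + 1) := List.drop_eq_getElem_cons hlt
      by_cases hc : sub[i] = c
      · have hstep : pvIsSubStep sub i c = i + 1 := by
          simp [pvIsSubStep, hlt, hc]
        rw [List.foldl_cons, hstep, ih (i + 1) hlt, hdrop]
        simp only [pvMatch, if_pos hc]
        omega
      · have hstep : pvIsSubStep sub i c = i := by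
          simp [pvIsSubStep, hlt, hc]
        rw [List.foldl_cons, hstep, ih i hi, hdrop]
        simp only [pvMatch, if_neg hc]
    · have hieq : i = sub.length := le_antisymm hi hge
      have hstep : pvIsSubStep sub i c = i := by simp [pvIsSubStep]; omega
      rw [List.foldl_cons, hstep, ih i hi]
      simp [hieq, pvMatch_nil_left]

lemma pvIsSub_iff (sub s : List Char) : pvIsSub sub s = true ↔ sub.Sublist s := by
  have h0 := foldl_pvIsSubStep sub s 0 (Nat.zero_le _)
  simp only [Nat.zero_add, List.drop_zero] at h0
  constructor
  · intro h
    have hlen : pvMatch sub s = sub.length := by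
      simpa [pvIsSub, h0] using h
    have h3 := take_pvMatch_sublist s sub
    rwa [hlen, List.take_length] at h3
  · intro h
    have h1 : sub.length ≤ pvMatch sub s := length_le_pvMatch s sub sub h List.prefix_rfl
    have h2 := pvMatch_le s sub
    simp [pvIsSub, h0]
    omega

-- A's backward walk computes `next - (greedy match of the remaining reversed suffix)`.
lemma pvAAux_eq (l1 : List Char) :
    ∀ (r2 : List Char) (m : Nat), m ≤ l1.length →
      pvAAux l1 r2 ((l1.length : Int) - 1 - m) =
        (l1.length : Int) - 1 - m - pvMatch (l1.reverse.drop m) r2 := by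
  intro r2
  induction r2 with
  | nil => intro m _; simp [pvAAux, pvMatch]
  | cons c rest ih =>
    intro m hm
    rcases Nat.lt_or_ge m l1.length with hlt | hge
    · have hne : ((l1.length : Int) - 1 - m) ≠ -1 := by omega
      have hidx : (PySem.List.pyGet? l1 ((l1.length : Int) - 1 - m)).getD 'a' =
          l1.reverse[m]'(by simpa using hlt) := by
        have hnn : (0 : Int) ≤ (l1.length : Int) - 1 - m := by omega
        rw [PySem.List.pyGet?_of_nonneg l1 hnn]
        have htn : ((l1.length : Int) - 1 - m).toNat = l1.length - 1 - m := by omega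
        rw [htn, List.getElem_reverse]
        rw [List.getElem?_eq_getElem (by omega)]
        rfl
      have hdrop : l1.reverse.drop m = l1.reverse[m]'(by simpa using hlt) :: l1.reverse.drop (m + 1) :=
        List.drop_eq_getElem_cons (by simpa using hlt)
      by_cases hc : l1.reverse[m]'(by simpa using hlt) = c
      · have hrec : (l1.length : Int) - 1 - m - 1 = (l1.length : Int) - 1 - (m + 1 : Nat) := by
          push_cast; ring
        rw [pvAAux, if_neg hne, if_pos (by rw [hidx, hc]), hrec, ih (m + 1) hlt, hdrop]
        simp only [pvMatch, if_pos hc]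
        push_cast
        ring
      · rw [pvAAux, if_neg hne, if_neg (by rw [hidx]; exact hc), ih m hm, hdrop]
        simp only [pvMatch, if_neg hc]
    · have hmeq : m = l1.length := le_antisymm hm hge
      have hne : ((l1.length : Int) - 1 - m) = -1 := by omega
      have hdn : List.drop m l1.reverse = [] := by
        apply List.drop_eq_nil_of_le
        simp [hmeq]
      rw [pvAAux, if_pos hne, hdn, pvMatch_nil_left]
      simp

-- characterisation of B's predicate: s1[k:] is a subsequence of s2 iff k ≥ len(s1) - G
lemma pvP_iff (l1 l2 : List Char) (k : Nat) :
    pvIsSub (l1.drop k) l2 = true ↔ l1.length - pvMatch l1.reverse l2.reverse ≤ k := by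
  rw [pvIsSub_iff]
  constructor
  · intro hs
    have hrev : (l1.drop k).reverse.Sublist l2.reverse := hs.reverse
    rw [List.reverse_drop] at hrev
    have hpre : (l1.reverse.take (l1.length - k)) <+: l1.reverse := List.take_prefix _ _
    have := length_le_pvMatch l2.reverse _ l1.reverse hrev hpre
    simp at this
    omega
  · intro hk
    set N := l1.length - pvMatch l1.reverse l2.reverse with hN
    have hG : pvMatch l1.reverse l2.reverse ≤ l1.length := by
      simpa using pvMatch_le l2.reverse l1.reverse
    have hNs : (l1.drop N).Sublist l2 := by
      have h1 : (l1.reverse.take (pvMatch l1.reverse l2.reverse)).Sublist l2.reverse :=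
        take_pvMatch_sublist l2.reverse l1.reverse
      have h2 : (l1.drop N).reverse = l1.reverse.take (pvMatch l1.reverse l2.reverse) := by
        rw [List.reverse_drop, hN]
        congr 1
        omega
      have := h1.reverse
      rw [← h2] at this
      simpa using this
    have hsub2 : ((l1.drop N).drop (k - N)).Sublist l2 := ((l1.drop N).drop_sublist (k - N)).trans hNs
    rw [List.drop_drop] at hsub2
    have hk' : N + (k - N) = k := by omega
    rwa [hk'] at hsub2

-- binary search returns the least index satisfying the (monotone) predicate
lemma pvBSearch_eq (l1 l2 : List Char) (N : Nat)
    (hiff : ∀ k, pvIsSub (l1.drop k) l2 = true ↔ N ≤ k) :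
    ∀ (fuel lo hi : Nat), hi - lo ≤ fuel → lo ≤ N → N ≤ hi → pvBSearch l1 l2 lo hi = N := by
  intro fuel
  induction fuel with
  | zero =>
    intro lo hi hf hlo hhi
    rw [pvBSearch, dif_neg (by omega)]
    omega
  | succ f ih =>
    intro lo hi hf hlo hhi
    by_cases h : lo < hi
    · rw [pvBSearch, dif_pos h]
      by_cases hp : pvIsSub (l1.drop ((lo + hi) / 2)) l2 = true
      · rw [if_pos hp]
        have hNm : N ≤ (lo + hi) / 2 := (hiff _).mp hp
        exact ih lo ((lo + hi) / 2) (by omega) hlo hNm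
      · rw [if_neg hp]
        have hmN : (lo + hi) / 2 < N := by
          by_contra hcon
          exact hp ((hiff _).mpr (by omega))
        exact ih ((lo + hi) / 2 + 1) hi (by omega) (by omega) hhi
    · rw [pvBSearch, dif_neg h]
      omega

-- ===== VERDICT (by name: the statement is the Claim_ definition above) =====
theorem longest_suffix_index_spec : Claim_equal_longest_suffix_index := by
  intro s1 s2 _
  unfold Spec_longest_suffix_index longest_suffix_index longest_suffix_index_alt
  set l1 := s1.toList
  set l2 := s2.toList
  have hG : pvMatch l1.reverse l2.reverse ≤ l1.length := by
    simpa using pvMatch_le l2.reverse l1.reverse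
  set N := l1.length - pvMatch l1.reverse l2.reverse with hN
  have hA := pvAAux_eq l1 l2.reverse 0 (Nat.zero_le _)
  simp only [Nat.cast_zero, sub_zero, List.drop_zero] at hA
  have hB := pvBSearch_eq l1 l2 N (fun k => pvP_iff l1 l2 k) l1.length 0 l1.length
    (by omega) (by omega) (by omega)
  rw [hB, hA]
  omega
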